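-- pv_equiv track=rewrite | github.com/Mielecki/Minimalizacja | minimalizacja.py | lacz
-- ===== SOURCE A (Python) =====
-- def lacz(vec1,vec2):
--     counter = 0
--     result = ""
--
--     for i in range(len(vec1)):
--         if vec1[i]== vec2[i]:
--             result += vec1[i]
--         else:
--             result += '-'
--             counter += 1
--
--     if counter == 1:
--         return result
--     return None
-- ===== SOURCE B (Python) =====
-- def lacz(vec1, vec2):
--     diff = [i for i in range(len(vec1)) if vec1[i] != vec2[i]]
--     if len(diff) != 1:
--         return None
--     j = diff[0]
--     return ''.join('-' if i == j else vec1[i] for i in range(len(vec1)))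
-- ===== Notes on version B (the rewrite author's own statement) =====
-- stated objective: alternative
-- what changed: Replaced the interleaved build-and-count single pass with a two-pass locate-then-reconstruct shape: first collect the mismatch indices, then rebuild the string (placing '-' only at the unique mismatch index, without re-reading vec2) only when exactly one mismatch exists.
import Mathlib
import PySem

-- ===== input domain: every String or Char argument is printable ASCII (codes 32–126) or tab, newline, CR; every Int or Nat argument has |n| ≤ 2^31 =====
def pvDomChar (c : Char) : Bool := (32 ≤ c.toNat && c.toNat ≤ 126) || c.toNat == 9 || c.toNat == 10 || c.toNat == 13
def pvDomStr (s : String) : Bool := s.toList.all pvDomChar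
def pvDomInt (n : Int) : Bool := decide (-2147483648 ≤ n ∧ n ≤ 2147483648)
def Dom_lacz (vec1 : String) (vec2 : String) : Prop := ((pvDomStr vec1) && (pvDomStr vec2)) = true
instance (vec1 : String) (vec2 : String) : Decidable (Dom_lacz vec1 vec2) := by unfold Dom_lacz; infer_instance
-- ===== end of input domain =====

-- B replaces A's interleaved build-and-count single pass by a two-pass locate-then-reconstruct
-- decomposition (objective: alternative, same cost).

-- ===== PORT A =====
-- the for-loop over range(len(vec1)); 'none' from the vec2[i] lookup is Python's IndexError
def laczAux (l1 l2 : List Char) (i : Nat) (counter : Int) (result : List Char) :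
    Option (Int × List Char) :=
  if h : i < l1.length then
    match PySem.List.pyGet? l2 (i : Int) with
    | none => none  -- IndexError (excluded by Pre_)
    | some c2 =>
      if l1[i] = c2 then laczAux l1 l2 (i + 1) counter (result ++ [l1[i]])
      else laczAux l1 l2 (i + 1) (counter + 1) (result ++ ['-'])
  else some (counter, result)
termination_by l1.length - i

def lacz (vec1 : String) (vec2 : String) : Option String :=
  match laczAux vec1.toList vec2.toList 0 0 [] with
  | none => none
  | some (counter, result) => if counter = 1 then some (String.ofList result) else none

-- ===== PORT B =====
def lacz_alt (vec1 : String) (vec2 : String) : Option String :=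
  let l1 := vec1.toList
  let l2 := vec2.toList
  let diff := (List.range l1.length).filter
    (fun (i : Nat) => !(PySem.List.pyGet? l1 (i : Int) == PySem.List.pyGet? l2 (i : Int)))
  match diff with
  | [j] => some (String.ofList ((List.range l1.length).map
      (fun (i : Nat) => if i = j then '-' else PySem.List.pyGetD l1 (i : Int) '-')))
  | _ => none

-- ===== PRECONDITION & SPEC =====
-- Pre_ excludes exactly the inputs where A raises IndexError (vec2 shorter than vec1)
def Pre_lacz (vec1 : String) (vec2 : String) : Prop :=
  vec1.toList.length ≤ vec2.toList.length
instance (vec1 : String) (vec2 : String) : Decidable (Pre_lacz vec1 vec2) := by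
  unfold Pre_lacz; infer_instance

def pvWitness_lacz : String × String := ("abc", "adc")

def Spec_lacz (vec1 : String) (vec2 : String) (out : Option String) : Prop := out = lacz_alt vec1 vec2
instance (vec1 : String) (vec2 : String) (out : Option String) : Decidable (Spec_lacz vec1 vec2 out) := by unfold Spec_lacz; infer_instance

-- ===== CLAIM (what is proved, stated in full; the proofs are below) =====
def Claim_equal_lacz : Prop := ∀ (vec1 : String) (vec2 : String), Dom_lacz vec1 vec2 → Pre_lacz vec1 vec2 → Spec_lacz vec1 vec2 (lacz vec1 vec2)

-- ===== LEMMAS AND PROOFS =====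

-- canonical mismatch count / merged characters, by simultaneous recursion
def cnt : List Char → List Char → Int
  | [], _ => 0
  | _ :: _, [] => 0
  | a :: t1, b :: t2 => (if a = b then 0 else 1) + cnt t1 t2

def mrg : List Char → List Char → List Char
  | [], _ => []
  | _ :: _, [] => []
  | a :: t1, b :: t2 => (if a = b then a else '-') :: mrg t1 t2

lemma laczAux_spec (l1 l2 : List Char) (h : l1.length ≤ l2.length) :
    ∀ fuel i c r, l1.length - i ≤ fuel →
      laczAux l1 l2 i c r =
        some (c + cnt (l1.drop i) (l2.drop i), r ++ mrg (l1.drop i) (l2.drop i)) := by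
  intro fuel
  induction fuel with
  | zero =>
    intro i c r hf
    have hi : ¬ i < l1.length := by omega
    rw [laczAux, dif_neg hi]
    have hnil : l1.drop i = [] := List.drop_eq_nil_of_le (by omega)
    simp [hnil, cnt, mrg]
  | succ f ih =>
    intro i c r hf
    by_cases hi : i < l1.length
    · have hi2 : i < l2.length := lt_of_lt_of_le hi h
      have hg : PySem.List.pyGet? l2 (i : Int) = some l2[i] := by
        simp [PySem.List.pyGet?_natCast, List.getElem?_eq_getElem hi2]
      have hd1 : l1.drop i = l1[i] :: l1.drop (i + 1) := (List.getElem_cons_drop hi).symm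
      have hd2 : l2.drop i = l2[i] :: l2.drop (i + 1) := (List.getElem_cons_drop hi2).symm
      rw [laczAux]
      simp only [dif_pos hi, hg]
      by_cases he : l1[i] = l2[i]
      · simp only [he, if_true]
        rw [ih (i + 1) c (r ++ [l2[i]]) (by omega), hd1, hd2]
        simp [cnt, mrg, he]
      · rw [if_neg he, ih (i + 1) (c + 1) (r ++ ['-']) (by omega), hd1, hd2]
        simp only [cnt, mrg, if_neg he, Option.some.injEq, Prod.mk.injEq]
        exact ⟨by ring, by simp⟩
    · rw [laczAux, dif_neg hi]
      have hnil : l1.drop i = [] := List.drop_eq_nil_of_le (by omega)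
      simp [hnil, cnt, mrg]

lemma cnt_eq (l1 l2 : List Char) (h : l1.length ≤ l2.length) :
    cnt l1 l2 = ((List.range l1.length).countP
      (fun k => !(l1[k]? == l2[k]?)) : Nat) := by
  induction l1 generalizing l2 with
  | nil => simp [cnt]
  | cons a t1 ih =>
    cases l2 with
    | nil => simp at h
    | cons b t2 =>
      simp only [List.length_cons, List.range_succ_eq_map, List.countP_cons, List.countP_map]
      have hh : t1.length ≤ t2.length := by simpa using h
      rw [cnt, ih t2 hh]
      by_cases he : a = b <;> simp [he, Function.comp_def, List.getElem?_cons_succ] <;> omega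

lemma mrg_length (l1 l2 : List Char) (h : l1.length ≤ l2.length) :
    (mrg l1 l2).length = l1.length := by
  induction l1 generalizing l2 with
  | nil => simp [mrg]
  | cons a t1 ih =>
    cases l2 with
    | nil => simp at h
    | cons b t2 => simp [mrg, ih t2 (by simpa using h)]

lemma mrg_getElem (l1 l2 : List Char) (h : l1.length ≤ l2.length) (k : Nat)
    (hk : k < l1.length) (hk' : k < (mrg l1 l2).length) :
    (mrg l1 l2)[k] = if l1[k] = l2[k]'(by omega) then l1[k] else '-' := by
  induction l1 generalizing l2 k with
  | nil => simp at hk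
  | cons a t1 ih =>
    cases l2 with
    | nil => simp at h
    | cons b t2 =>
      cases k with
      | zero => simp [mrg]
      | succ m =>
        have hh : t1.length ≤ t2.length := by simpa using h
        have hm : m < t1.length := by simpa using hk
        have hm' : m < (mrg t1 t2).length := by rw [mrg_length t1 t2 hh]; exact hm
        simp only [mrg, List.getElem_cons_succ]
        exact ih t2 hh m hm hm'

lemma cnt_len (l1 l2 : List Char) (h : l1.length ≤ l2.length) :
    cnt l1 l2 = (((List.range l1.length).filter
      (fun k => !(l1[k]? == l2[k]?))).length : Nat) := by
  rw [cnt_eq l1 l2 h, List.countP_eq_length_filter]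

lemma mrg_map (l1 l2 : List Char) (h : l1.length ≤ l2.length) (j : Nat)
    (hd : (List.range l1.length).filter (fun k => !(l1[k]? == l2[k]?)) = [j]) :
    (List.range l1.length).map (fun i => if i = j then '-' else l1.getD i '-') = mrg l1 l2 := by
  have hmem : ∀ k, (k < l1.length ∧ l1[k]? ≠ l2[k]?) ↔ k = j := by
    intro k
    rw [show (k = j) = (k ∈ [j]) by simp, ← hd]
    simp [List.mem_filter]
  apply List.ext_getElem
  · rw [mrg_length l1 l2 h]; simp
  · intro k hk hk'
    have hkn : k < l1.length := by simpa using hk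
    have hk2 : k < l2.length := lt_of_lt_of_le hkn h
    rw [mrg_getElem l1 l2 h k hkn hk', List.getElem_map, List.getElem_range]
    have hiff := hmem k
    rw [List.getElem?_eq_getElem hkn, List.getElem?_eq_getElem hk2] at hiff
    by_cases hkj : k = j
    · subst hkj
      have hne : ¬ l1[k] = l2[k] := by
        intro he
        exact (by simpa [he] using (hiff.mpr rfl).2 : False)
      simp [hne]
    · have he : l1[k] = l2[k] := by
        by_contra hne
        exact hkj (hiff.mp ⟨hkn, by simpa using hne⟩)
      simp [hkj, he, List.getD_eq_getElem?_getD, List.getElem?_eq_getElem hkn]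

lemma alt_eq (vec1 vec2 : String) (h : vec1.toList.length ≤ vec2.toList.length) :
    lacz_alt vec1 vec2 =
      if cnt vec1.toList vec2.toList = 1
      then some (String.ofList (mrg vec1.toList vec2.toList)) else none := by
  unfold lacz_alt
  set l1 := vec1.toList with hl1
  set l2 := vec2.toList with hl2
  simp only [PySem.List.pyGet?_natCast, PySem.List.pyGetD_natCast]
  have hc := cnt_len l1 l2 h
  rcases hd : (List.range l1.length).filter (fun k => !(l1[k]? == l2[k]?)) with _ | ⟨j, _ | ⟨j2, rest⟩⟩
  · rw [hd] at hc
    simp at hc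
    simp [hc]
  · rw [hd] at hc
    simp at hc
    rw [← mrg_map l1 l2 h j hd]
    simp [hc]
  · rw [hd] at hc
    have : cnt l1 l2 ≠ 1 := by rw [hc]; simp; omega
    simp [this]

-- ===== VERDICT (by name: the statement is the Claim_ definition above) =====
theorem lacz_spec : Claim_equal_lacz := by
  intro vec1 vec2 _ hpre
  have h : vec1.toList.length ≤ vec2.toList.length := hpre
  unfold Spec_lacz lacz
  rw [laczAux_spec vec1.toList vec2.toList h vec1.toList.length 0 0 [] (by omega)]
  simp only [List.drop_zero, List.nil_append, Int.zero_add]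
  rw [alt_eq vec1 vec2 h]
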